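-- pv_equiv track=rewrite | github.com/nextcloud/appstore | nextcloudappstore/core/versioning.py | pad_max_version
-- ===== SOURCE A (Python) =====
-- def pad_max_version(version: str) -> str:
--     """
--     Turns inclusive maximum versions into exclusiv semantic versions
--     e.g.: 9 into 10.0.0, 9.0 into 9.1.0, 9.0.0 into 9.0.1
--     :argument inclusive version maximum to pad
--     :return an exclusive maximum version
--     """
--     if not version:
--         return '*'
--
--     parts = [int(part) for part in version.split('.')]
--     if len(parts) == 1:
--         parts[0] += 1
--         parts += [0, 0]
--     elif len(parts) == 2:
--         parts[1] += 1
--         parts += [0]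
--     elif len(parts) == 3:
--         parts[2] += 1
--     else:
--         raise ValueError('Could not parse version %s' % version)
--     return '.'.join([str(part) for part in parts])
-- ===== SOURCE B (Python) =====
-- def pad_max_version(version: str) -> str:
--     """
--     Turns inclusive maximum versions into exclusive semantic versions
--     (single recursive pass: convert each component, bump at the tail,
--     pad from a zero budget carried down the recursion).
--     """
--     if not version:
--         return '*'
--     return '.'.join(str(p) for p in _bump(version.split('.'), 2, version))
--
--
-- def _bump(parts, budget, original):
--     if budget < 0:
--         raise ValueError('Could not parse version %s' % original)
--     head, *rest = parts
--     n = int(head)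
--     if rest:
--         return [n] + _bump(rest, budget - 1, original)
--     return [n + 1] + [0] * budget
-- ===== Notes on version B (the rewrite author's own statement) =====
-- stated objective: alternative
-- what changed: replaces A's parse-everything-then-branch-on-length cascade with a single recursive pass over the split components that converts each one, increments at the tail, and pads from a zero budget carried down the recursion (no length inspection, no pre-built int list)
import Mathlib
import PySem

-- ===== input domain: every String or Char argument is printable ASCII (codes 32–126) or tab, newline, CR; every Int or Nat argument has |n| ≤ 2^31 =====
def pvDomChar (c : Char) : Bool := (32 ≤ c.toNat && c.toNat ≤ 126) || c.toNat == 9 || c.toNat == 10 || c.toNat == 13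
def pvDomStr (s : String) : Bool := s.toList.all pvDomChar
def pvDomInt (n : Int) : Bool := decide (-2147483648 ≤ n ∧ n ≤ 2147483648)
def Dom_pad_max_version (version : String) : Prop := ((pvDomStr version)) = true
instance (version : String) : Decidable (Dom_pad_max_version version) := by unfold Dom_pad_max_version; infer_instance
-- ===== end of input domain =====

-- B replaces A's parse-all-then-branch-on-length cascade by one recursive pass that
-- converts, bumps at the tail and pads from a carried zero budget (objective: alternative).

-- shared builtin: version.split('.') ('.' is non-empty, so split? always returns some)
def pvSplitDot (version : String) : List String := (PySem.Str.split? version ".").getD []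

-- ===== PORT A =====
def pad_max_version (version : String) : String :=
  if version = "" then "*"
  else
    match (pvSplitDot version).mapM PySem.Int.ofStr? with
    | none => ""   -- int() raises ValueError here; excluded by Pre_
    | some parts =>
      match parts with
      | [a] => PySem.Str.join "." ([a + 1, 0, 0].map PySem.Int.toStr)
      | [a, b] => PySem.Str.join "." ([a, b + 1, 0].map PySem.Int.toStr)
      | [a, b, c] => PySem.Str.join "." ([a, b, c + 1].map PySem.Int.toStr)
      | _ => ""   -- raise ValueError; excluded by Pre_

-- ===== PORT B =====
-- recursive helper _bump(parts, budget, original); none = the ValueError / unpack-of-empty cases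
def pvBump : List String → Int → Option (List Int)
  | parts, budget =>
    if budget < 0 then none                       -- raise ValueError
    else
      match parts with
      | [] => none                                -- 'head, *rest = parts' on empty (unreachable from split)
      | head :: rest =>
        match PySem.Int.ofStr? head with
        | none => none                            -- int() raises ValueError
        | some n =>
          match rest with
          | [] => some ((n + 1) :: List.replicate budget.toNat 0)
          | _ :: _ => (pvBump rest (budget - 1)).map (fun t => n :: t)

def pad_max_version_alt (version : String) : String :=
  if version = "" then "*"
  else
    match pvBump (pvSplitDot version) 2 with
    | none => ""                                  -- a ValueError was raised; excluded by Pre_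
    | some parts => PySem.Str.join "." (parts.map PySem.Int.toStr)

-- ===== PRECONDITION & SPEC =====
-- Pre_ excludes exactly the inputs on which A raises ValueError: an unparsable component or more than 3 components.
def Pre_pad_max_version (version : String) : Prop :=
  version = "" ∨
    ((pvSplitDot version).length ≤ 3 ∧
     ∀ p ∈ pvSplitDot version, (PySem.Int.ofStr? p).isSome = true)
instance (version : String) : Decidable (Pre_pad_max_version version) := by
  unfold Pre_pad_max_version; infer_instance
def pvWitness_pad_max_version : String := "9.0"

def Spec_pad_max_version (version : String) (out : String) : Prop := out = pad_max_version_alt version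
instance (version : String) (out : String) : Decidable (Spec_pad_max_version version out) := by unfold Spec_pad_max_version; infer_instance

-- ===== CLAIM (what is proved, stated in full; the proofs are below) =====
def Claim_equal_pad_max_version : Prop := ∀ (version : String), Dom_pad_max_version version → Pre_pad_max_version version → Spec_pad_max_version version (pad_max_version version)

-- ===== LEMMAS AND PROOFS =====

-- ===== VERDICT (by name: the statement is the Claim_ definition above) =====
theorem pad_max_version_spec : Claim_equal_pad_max_version := by
  intro version _ hpre
  unfold Spec_pad_max_version pad_max_version pad_max_version_alt
  by_cases hv : version = ""
  · simp [hv]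
  · simp only [hv, if_false]
    rcases hpre with h | ⟨hlen, hall⟩
    · exact absurd h hv
    match hps : pvSplitDot version, hlen, hall with
    | [], _, _ => simp [pvBump]
    | [a], _, hall =>
      obtain ⟨x, hx⟩ := Option.isSome_iff_exists.mp (hall a (by simp))
      simp [pvBump, hx, List.mapM_cons]
    | [a, b], _, hall =>
      obtain ⟨x, hx⟩ := Option.isSome_iff_exists.mp (hall a (by simp))
      obtain ⟨y, hy⟩ := Option.isSome_iff_exists.mp (hall b (by simp))
      simp [pvBump, hx, hy, List.mapM_cons]
    | [a, b, c], _, hall =>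
      obtain ⟨x, hx⟩ := Option.isSome_iff_exists.mp (hall a (by simp))
      obtain ⟨y, hy⟩ := Option.isSome_iff_exists.mp (hall b (by simp))
      obtain ⟨z, hz⟩ := Option.isSome_iff_exists.mp (hall c (by simp))
      simp [pvBump, hx, hy, hz, List.mapM_cons]
    | a :: b :: c :: d :: t, hlen, _ =>
      exfalso; simp only [List.length_cons] at hlen; omega
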